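-- pv_equiv track=rewrite | github.com/StefanNede/BIO-Practice | 2022/ParkingGood.py | GetListHidden
-- ===== SOURCE A (Python) =====
-- EMPTY = "_"
--
-- def FindParkedCar(finalArrangement, car):
--     try:
--         return finalArrangement.index(car.lower())
--     except:
--         # this happens when the algorithm has gone through all cars
--         return None
--
-- def GetListHidden(finalArrangement,carsAlreadyParked):
--     '''
--     returns a list of the possible preferred positions for each car
--     e.g. cabd returns [['B'], ['B', 'C'], ['A'], ['A', 'B', 'C', 'D']]
--     '''
--     numEmptySpaces = carsAlreadyParked.count(EMPTY)
--     nonEmptySpaces = len(carsAlreadyParked) - numEmptySpaces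
--
--     if numEmptySpaces == 0:
--         return None
--
--     possiblePreferences = [] # holds all the preferences a car could have
--     carToPark = chr(65 + nonEmptySpaces)
--     # after the carsAlreadyParked is full we want to go past getting arrangements therefore
--     # whereIsCarParkedIndx returns None
--     whereIsCarParkedIndx = FindParkedCar(finalArrangement, carToPark)
--
--     if whereIsCarParkedIndx != None:
--         carsAlreadyParked[whereIsCarParkedIndx] = carToPark
--         spaceIndex = whereIsCarParkedIndx
--         while spaceIndex > -1 and carsAlreadyParked[spaceIndex] != EMPTY:
--             possiblePreferences.append(chr(65 + spaceIndex)) # returns parking space the car is in e.g. for a in cabd returns B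
--             spaceIndex -= 1
--         furtherPreferences = GetListHidden(finalArrangement,carsAlreadyParked)
--
--     # furtherPreferences will hold the preferences of all the cars in alphabetical order following the one that is currently being looked at e.g.
--     # for cabd:
--     # currently looking at a which has preference of 'B' then foro b,c,d these are preferences:
--     # [['B', 'C'], ['A'], ['A', 'B', 'C', 'D']]
--
--
--     # arrive here after all the cars have been looked at once, and
--     # due to recursive stack, will go backwards to the first car - which is what we really want to see
--     # because when the carToPark is a then the furtherPreferences will contain the preferences for each car
--
--     allPreferences = []
--     allPreferences.append(sorted(possiblePreferences))
--
--     if furtherPreferences != None: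
--         for pref in furtherPreferences:
--             allPreferences.append(sorted(pref))
--
--     return allPreferences
-- ===== SOURCE B (Python) =====
-- EMPTY = "_"
--
-- def GetListHidden(finalArrangement, carsAlreadyParked):
--     # Iterative rewrite: one pass builds a first-occurrence index of
--     # finalArrangement, then one loop over the cars to park maintains the
--     # parking state; mutates carsAlreadyParked in place like the original.
--     numEmptySpaces = carsAlreadyParked.count(EMPTY)
--     if numEmptySpaces == 0:
--         return None
--     nonEmptySpaces = len(carsAlreadyParked) - numEmptySpaces
--     first = {}
--     for i, ch in enumerate(finalArrangement):
--         if ch not in first: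
--             first[ch] = i
--     allPreferences = []
--     for code in range(65 + nonEmptySpaces, 65 + len(carsAlreadyParked)):
--         idx = first[chr(code).lower()]
--         carsAlreadyParked[idx] = chr(code)
--         lo = idx
--         while lo > 0 and carsAlreadyParked[lo - 1] != EMPTY:
--             lo -= 1
--         allPreferences.append([chr(65 + j) for j in range(lo, idx + 1)])
--     return allPreferences
-- ===== Notes on version B (the rewrite author's own statement) =====
-- stated objective: alternative
-- what changed: Replaces A's recursion (which rescans finalArrangement with str.index for every car and re-sorts every block at every recursion level) by a single loop that keeps the parking state, looks each label up in a first-occurrence dict built once, and emits each block in ascending order directly instead of collecting it backwards and sorting.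
import Mathlib
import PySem

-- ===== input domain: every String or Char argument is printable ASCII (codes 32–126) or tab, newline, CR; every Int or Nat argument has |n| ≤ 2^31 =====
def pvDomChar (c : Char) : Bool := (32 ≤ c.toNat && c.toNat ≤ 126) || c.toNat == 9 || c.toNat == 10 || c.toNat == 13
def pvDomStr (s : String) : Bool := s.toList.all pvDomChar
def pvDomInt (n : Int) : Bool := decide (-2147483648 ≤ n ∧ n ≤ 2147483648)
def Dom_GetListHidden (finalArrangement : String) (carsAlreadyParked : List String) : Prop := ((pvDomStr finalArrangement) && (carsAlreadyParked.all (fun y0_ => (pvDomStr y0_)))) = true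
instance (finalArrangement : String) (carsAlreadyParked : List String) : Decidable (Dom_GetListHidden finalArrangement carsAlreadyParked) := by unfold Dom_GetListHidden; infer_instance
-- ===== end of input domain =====

-- B replaces A's recursion with one loop that maintains the parking state, looks labels up in a
-- first-occurrence dict of finalArrangement built once instead of repeated str.index scans, and
-- emits each block in order instead of collecting backwards and sorting (objective: alternative).
-- Like A, B mutates carsAlreadyParked in place; the equivalence proved here is about the return
-- value (the mutation happens to be identical as well, but is not part of the claim).

-- ===== PORT A =====

-- 'try: return finalArrangement.index(car.lower()); except: return None' —
-- str.index of the one-char string car.lower(); find = -1 is exactly the except branch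
def pvFindParkedCar (finalArrangement : String) (car : Char) : Option Nat :=
  let f := PySem.Str.find finalArrangement (PySem.Str.lower (String.singleton car))
  if f = -1 then none else some f.toNat

-- 'while spaceIndex > -1 and carsAlreadyParked[spaceIndex] != EMPTY: append(chr(65+spaceIndex)); spaceIndex -= 1'
-- (the index is in range whenever this line runs — it starts at the index the assignment just used —
-- so the plain getD read is exact there)
def pvCollectA (cars : List String) : Nat → List String
  | 0 => if cars.getD 0 "" ≠ "_" then [String.singleton (Char.ofNat 65)] else []
  | i+1 => if cars.getD (i+1) "" ≠ "_" then
      String.singleton (Char.ofNat (65 + (i+1))) :: pvCollectA cars i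
    else []

-- the body of GetListHidden; the fuel only makes the recursion total (on every input A returns on,
-- numEmptySpaces strictly decreases, so fuel = numEmptySpaces + 1 at the top is never exhausted);
-- the 'none' results on the error paths stand for Python raising (UnboundLocalError / IndexError),
-- all outside Pre_
def pvGoA (finalArrangement : String) : Nat → List String → Option (List (List String))
  | 0, _ => none
  | fuel+1, cars =>
    -- numEmptySpaces = carsAlreadyParked.count(EMPTY); nonEmptySpaces = len - numEmptySpaces
    if PySem.List.count cars "_" = 0 then none
    else
      -- carToPark = chr(65 + nonEmptySpaces)
      match pvFindParkedCar finalArrangement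
          (Char.ofNat (65 + (cars.length - PySem.List.count cars "_"))) with
      | none => none -- Python: 'furtherPreferences' never assigned → UnboundLocalError
      | some i =>
        match PySem.List.pySet? cars (i : Int)
            (String.singleton (Char.ofNat (65 + (cars.length - PySem.List.count cars "_")))) with
        | none => none -- IndexError on 'carsAlreadyParked[whereIsCarParkedIndx] = carToPark'
        | some cars' =>
          -- allPreferences = [sorted(possiblePreferences)] + [sorted(p) for p in furtherPreferences]
          some (PySem.List.sorted (pvCollectA cars' i) (fun x => x) ::
            (match pvGoA finalArrangement fuel cars' with
             | none => []
             | some l => l.map (fun p => PySem.List.sorted p (fun x => x))))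

def GetListHidden (finalArrangement : String) (carsAlreadyParked : List String) :
    Option (List (List String)) :=
  pvGoA finalArrangement (PySem.List.count carsAlreadyParked "_" + 1) carsAlreadyParked

-- ===== PORT B =====

-- 'first = {}; for i, ch in enumerate(finalArrangement): if ch not in first: first[ch] = i'
def pvFirstMap (finalArrangement : String) : PySem.Dict Char Int :=
  (PySem.List.enumerate finalArrangement.toList).foldl
    (fun d p => if d.contains p.2 then d else d.insert p.2 p.1) PySem.Dict.empty

-- 'lo = idx; while lo > 0 and carsAlreadyParked[lo - 1] != EMPTY: lo -= 1'
-- (lo - 1 < len whenever read, so the plain getD read is exact there)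
def pvFindLo (slots : List String) : Nat → Nat
  | 0 => 0
  | lo+1 => if slots.getD lo "" ≠ "_" then pvFindLo slots lo else lo+1

-- one iteration of B's 'for code in range(...)' loop; the state is None once Python has raised
-- (KeyError from first[...] / IndexError from the assignment), which only happens outside Pre_
def pvStepB (fm : PySem.Dict Char Int) (st : Option (List String × List (List String)))
    (code : Int) : Option (List String × List (List String)) :=
  match st with
  | none => none
  | some (slots, out) =>
    -- 'idx = first[chr(code).lower()]; carsAlreadyParked[idx] = chr(code)'
    match fm.get? (PySem.Chars.lowerChar (Char.ofNat code.toNat)) with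
    | none => none -- KeyError
    | some idx =>
      match PySem.List.pySet? slots idx (String.singleton (Char.ofNat code.toNat)) with
      | none => none -- IndexError
      | some slots' =>
        -- 'allPreferences.append([chr(65 + j) for j in range(lo, idx + 1)])'
        some (slots', out ++ [(PySem.List.pyRange (pvFindLo slots' idx.toNat : Int) (idx + 1)).map
          (fun j => String.singleton (Char.ofNat (65 + j).toNat))])

def GetListHidden_alt (finalArrangement : String) (carsAlreadyParked : List String) :
    Option (List (List String)) :=
  if PySem.List.count carsAlreadyParked "_" = 0 then none
  else
    -- 'for code in range(65 + nonEmptySpaces, 65 + len(carsAlreadyParked)): ...'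
    match (PySem.List.pyRange
        ((65 + (carsAlreadyParked.length - PySem.List.count carsAlreadyParked "_") : Nat) : Int)
        ((65 + carsAlreadyParked.length : Nat) : Int)).foldl
        (pvStepB (pvFirstMap finalArrangement)) (some (carsAlreadyParked, [])) with
    | none => none -- Python raised (KeyError / IndexError), outside Pre_
    | some st => some st.2

-- ===== PRECONDITION & SPEC =====

-- the first position (if any) of the lowercased label of the (k+j)-th car in finalArrangement
def pvTarget (finalArrangement : String) (n e j : Nat) : Option Nat :=
  PySem.List.index? finalArrangement.toList
    (PySem.Chars.lowerChar (Char.ofNat (65 + (n - e) + j)))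

-- Exactly the inputs on which A returns: either no empty space (A returns None at once), or every
-- car still to park has a label ≠ '_' whose lowercase form occurs in finalArrangement at a first
-- position that is in range of carsAlreadyParked, originally empty, and distinct across the cars —
-- otherwise Python raises (UnboundLocalError when a label is not found, IndexError when the
-- position is out of range, RecursionError when a position repeats or a label is '_').
-- The bound 65 + i < 55296 keeps every produced space label chr(65+i) a representable Lean Char
-- (no lone surrogates); on the ASCII domain it excludes no input A returns on, since a run of
-- consecutive labels all findable in an ASCII string forces the found indices far below it.
def Pre_GetListHidden (finalArrangement : String) (carsAlreadyParked : List String) : Prop :=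
  (let e := PySem.List.count carsAlreadyParked "_"
   let n := carsAlreadyParked.length
   e == 0 ||
     (((List.range e).all fun j =>
        (65 + (n - e) + j != 95) &&
        match pvTarget finalArrangement n e j with
        | some i => decide (i < n) && (carsAlreadyParked.getD i "" == "_") && decide (65 + i < 55296)
        | none => false)
      && decide (((List.range e).map (pvTarget finalArrangement n e)).Nodup))) = true

instance (finalArrangement : String) (carsAlreadyParked : List String) :
    Decidable (Pre_GetListHidden finalArrangement carsAlreadyParked) := by
  unfold Pre_GetListHidden; infer_instance

def pvWitness_GetListHidden : String × List String := ("cabd", ["_", "_", "_", "_"])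

def Spec_GetListHidden (finalArrangement : String) (carsAlreadyParked : List String)
    (out : Option (List (List String))) : Prop :=
  out = GetListHidden_alt finalArrangement carsAlreadyParked

instance (finalArrangement : String) (carsAlreadyParked : List String)
    (out : Option (List (List String))) :
    Decidable (Spec_GetListHidden finalArrangement carsAlreadyParked out) := by
  unfold Spec_GetListHidden; infer_instance

-- ===== CLAIM (what is proved, stated in full; the proofs are below) =====
def Claim_equal_GetListHidden : Prop := ∀ (finalArrangement : String) (carsAlreadyParked : List String), Dom_GetListHidden finalArrangement carsAlreadyParked → Pre_GetListHidden finalArrangement carsAlreadyParked → Spec_GetListHidden finalArrangement carsAlreadyParked (GetListHidden finalArrangement carsAlreadyParked)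

-- ===== LEMMAS AND PROOFS =====

set_option maxRecDepth 4000 in
lemma pv_toNat_ofNat {n : Nat} (h : n < 55296) : (Char.ofNat n).toNat = n := by
  have hv : n.isValidChar := Or.inl h
  rw [Char.ofNat, dif_pos hv]
  simp [Char.toNat, Char.ofNatAux]

lemma pv_ofNat_lt {a b : Nat} (hab : a < b) (hb : b < 55296) :
    Char.ofNat a < Char.ofNat b := by
  have ha : (Char.ofNat a).toNat = a := pv_toNat_ofNat (by omega)
  have hb' : (Char.ofNat b).toNat = b := pv_toNat_ofNat hb
  rw [Char.lt_def, UInt32.lt_iff_toNat_lt]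
  simp only [Char.toNat] at ha hb'
  omega

lemma pv_singleton_lt {c d : Char} (h : c < d) :
    String.singleton c < String.singleton d := by
  rw [String.lt_iff_toList_lt]
  simp only [String.toList_singleton]
  exact List.Lex.rel h

set_option maxRecDepth 4000 in
lemma pv_singleton_ne_underscore {n : Nat} (h : n ≠ 95) :
    String.singleton (Char.ofNat n) ≠ "_" := by
  intro he
  have hc : Char.ofNat n = '_' := by
    have := congrArg String.toList he
    simpa using this
  have := congrArg Char.toNat hc
  rw [show ('_' : Char).toNat = 95 from rfl] at this
  by_cases hv : n.isValidChar
  · rw [Char.ofNat, dif_pos hv] at this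
    simp [Char.toNat, Char.ofNatAux] at this
    omega
  · rw [Char.ofNat, dif_neg hv] at this
    simp [Char.toNat] at this

lemma pv_singleton_prefix_drop {s : List Char} {k : Nat} {c : Char} :
    [c] <+: s.drop k ↔ s[k]? = some c := by
  constructor
  · rintro ⟨t, ht⟩
    have : (s.drop k).head? = some c := by rw [← ht]; rfl
    rwa [List.head?_drop] at this
  · intro h
    have hk : k < s.length := by
      by_contra hk
      rw [List.getElem?_eq_none (by omega)] at h
      simp at h
    have hv : s[k] = c := by
      rw [List.getElem?_eq_getElem hk] at h
      exact Option.some.inj h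
    rw [List.drop_eq_getElem_cons hk, hv]
    exact ⟨s.drop (k+1), rfl⟩

lemma pv_find_singleton (s : List Char) (c : Char) :
    PySem.Chars.find s [c] =
      (match PySem.List.index? s c with | none => -1 | some i => (i : Int)) := by
  cases h : PySem.List.index? s c with
  | none =>
    have hc : c ∉ s := (PySem.List.index?_eq_none_iff s c).1 h
    refine (PySem.Chars.find_eq_neg_one_iff s [c]).2 ?_
    intro hinf
    exact hc (hinf.subset (by simp))
  | some i =>
    obtain ⟨hi, hci, hmin⟩ := PySem.List.getElem_of_index?_eq_some h
    have hmem : [c] <:+: s := by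
      have hpre : [c] <+: s.drop i :=
        pv_singleton_prefix_drop.2 (by rw [List.getElem?_eq_getElem hi, hci])
      obtain ⟨t, ht⟩ := hpre
      exact ⟨s.take i, t, by rw [List.append_assoc, ht, List.take_append_drop]⟩
    have h0 : 0 ≤ PySem.Chars.find s [c] := (PySem.Chars.find_nonneg_iff s [c]).2 hmem
    obtain ⟨hpre, hmin'⟩ := PySem.Chars.find_spec h0
    set m := (PySem.Chars.find s [c]).toNat with hm
    have hsm : s[m]? = some c := pv_singleton_prefix_drop.1 hpre
    have hmlt : m < s.length := by
      by_contra hk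
      rw [List.getElem?_eq_none (by omega)] at hsm
      simp at hsm
    have hmeq : m = i := by
      rcases Nat.lt_trichotomy m i with hlt | heq | hgt
      · exact absurd (by rw [List.getElem?_eq_getElem hmlt] at hsm; exact Option.some.inj hsm)
          (hmin m hlt)
      · exact heq
      · exact absurd (pv_singleton_prefix_drop.2 (by rw [List.getElem?_eq_getElem hi, hci]))
          (hmin' i hgt)
    have : PySem.Chars.find s [c] = (m : Int) := (Int.toNat_of_nonneg h0).symm
    rw [this, hmeq]

lemma pv_firstMap_fold (l : List (Int × Char)) (d : PySem.Dict Char Int) (ch : Char) :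
    (l.foldl (fun d p => if d.contains p.2 then d else d.insert p.2 p.1) d).get? ch
      = (match d.get? ch with
         | some v => some v
         | none => (l.find? (fun p => p.2 == ch)).map (·.1)) := by
  induction l generalizing d with
  | nil => cases hd : d.get? ch <;> simp [hd]
  | cons p t ih =>
    obtain ⟨i, c⟩ := p
    rw [List.foldl_cons]
    by_cases hc : d.contains c
    · rw [if_pos hc, ih]
      by_cases hch : c = ch
      · subst hch
        have : (d.get? c).isSome := by rw [← PySem.Dict.contains_eq_isSome_get?]; exact hc
        obtain ⟨v, hv⟩ := Option.isSome_iff_exists.1 this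
        simp [hv]
      · simp [hch]
    · rw [if_neg hc, ih]
      by_cases hch : c = ch
      · subst hch
        rw [PySem.Dict.get?_insert_self]
        rw [(PySem.Dict.get?_eq_none_iff_contains d c).2 (by simpa using hc)]
        simp
      · rw [PySem.Dict.get?_insert_of_ne d _ (fun he => hch he.symm)]
        simp [hch]

lemma pv_find?_enumerate (s : List Char) (ch : Char) : ∀ k : Int,
    ((PySem.List.enumerate s k).find? (fun p => p.2 == ch)).map (·.1)
      = (PySem.List.index? s ch).map (fun i : Nat => k + (i : Int)) := by
  induction s with
  | nil => intro k; simp [PySem.List.enumerate_nil, PySem.List.index?_eq_idxOf?]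
  | cons c t ih =>
    intro k
    rw [PySem.List.enumerate_cons, List.find?_cons]
    by_cases hch : c = ch
    · subst hch
      rw [PySem.List.index?_cons_self]
      simp
    · have hne : (c == ch) = false := by simpa using hch
      rw [hne]
      rw [ih (k + 1), PySem.List.index?_cons_of_ne t hch]
      cases hidx : PySem.List.index? t ch <;> simp
      omega

lemma pv_firstMap_get? (fa : String) (ch : Char) :
    (pvFirstMap fa).get? ch = (PySem.List.index? fa.toList ch).map (fun i : Nat => (i : Int)) := by
  unfold pvFirstMap
  rw [pv_firstMap_fold]
  rw [PySem.Dict.get?_empty]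
  rw [pv_find?_enumerate fa.toList ch 0]
  cases hidx : PySem.List.index? fa.toList ch <;> simp

lemma pv_getD_set_self (l : List String) {i : Nat} (hi : i < l.length) (v : String) :
    (l.set i v).getD i "" = v := by
  rw [List.getD_eq_getElem?_getD, List.getElem?_set_self hi]
  rfl

lemma pv_getD_set_ne (l : List String) {i j : Nat} (h : i ≠ j) (v : String) :
    (l.set i v).getD j "" = l.getD j "" := by
  rw [List.getD_eq_getElem?_getD, List.getElem?_set_ne h, ← List.getD_eq_getElem?_getD]

lemma pv_count_set (l : List String) {i : Nat} (hi : i < l.length) (hg : l.getD i "" = "_")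
    {v : String} (hv : v ≠ "_") :
    PySem.List.count (l.set i v) "_" + 1 = PySem.List.count l "_" := by
  rw [PySem.List.count_eq, PySem.List.count_eq, List.count_set hi]
  have hgi : l[i] = "_" := by
    rw [List.getD_eq_getElem?_getD, List.getElem?_eq_getElem hi] at hg
    exact hg
  have h1 : (l[i] == "_") = true := by simp [hgi]
  have h2 : (v == "_") = false := by simpa using hv
  rw [h1, h2]
  have : 0 < List.count "_" l := List.count_pos_iff.2 (hgi ▸ l.getElem_mem hi)
  simp
  omega

-- the per-step facts Pre_ guarantees, in the Prop form the induction consumes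
def pvOK (fa : String) (cars : List String) : Prop :=
  (∀ j < PySem.List.count cars "_",
     65 + (cars.length - PySem.List.count cars "_") + j ≠ 95 ∧
     ∃ i, pvTarget fa cars.length (PySem.List.count cars "_") j = some i ∧
       i < cars.length ∧ cars.getD i "" = "_" ∧ 65 + i < 55296) ∧
  ((List.range (PySem.List.count cars "_")).map
     (pvTarget fa cars.length (PySem.List.count cars "_"))).Nodup

lemma pv_pre_ok {fa : String} {cars : List String}
    (hp : Pre_GetListHidden fa cars) (hne : PySem.List.count cars "_" ≠ 0) : pvOK fa cars := by
  unfold Pre_GetListHidden at hp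
  simp only [Bool.or_eq_true, beq_iff_eq, Bool.and_eq_true] at hp
  rcases hp with h0 | ⟨hall, hnd⟩
  · exact absurd h0 hne
  constructor
  · intro j hj
    have hj' := (List.all_eq_true.1 hall) j (List.mem_range.2 hj)
    rw [Bool.and_eq_true] at hj'
    obtain ⟨h95, hrest⟩ := hj'
    refine ⟨by simpa using h95, ?_⟩
    cases htgt : pvTarget fa cars.length (PySem.List.count cars "_") j with
    | none => rw [htgt] at hrest; simp at hrest
    | some i =>
      rw [htgt] at hrest
      simp only [Bool.and_eq_true, decide_eq_true_eq, beq_iff_eq] at hrest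
      exact ⟨i, rfl, hrest.1.1, hrest.1.2, hrest.2⟩
  · exact of_decide_eq_true hnd

lemma pv_findLo_le (slots : List String) : ∀ i, pvFindLo slots i ≤ i := by
  intro i
  induction i with
  | zero => exact Nat.le_refl 0
  | succ i ih =>
    unfold pvFindLo
    split
    · exact Nat.le_trans ih (Nat.le_succ i)
    · exact Nat.le_refl _

lemma pv_collect_empty (slots : List String) {i : Nat} (h : slots.getD i "" = "_") :
    pvCollectA slots i = [] := by
  cases i with
  | zero => rw [pvCollectA, if_neg (not_not_intro h)]
  | succ m => rw [pvCollectA, if_neg (not_not_intro h)]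

lemma pv_collect_eq (slots : List String) : ∀ i, slots.getD i "" ≠ "_" →
    pvCollectA slots i
      = ((List.range' (pvFindLo slots i) (i + 1 - pvFindLo slots i)).map
          (fun j => String.singleton (Char.ofNat (65 + j)))).reverse := by
  intro i
  induction i with
  | zero =>
    intro h
    rw [pvCollectA, if_pos h]
    rfl
  | succ i ih =>
    intro h
    by_cases hgi : slots.getD i "" ≠ "_"
    · have heq : pvFindLo slots (i+1) = pvFindLo slots i := by
        rw [show pvFindLo slots (i+1)
            = if slots.getD i "" ≠ "_" then pvFindLo slots i else i+1 from rfl, if_pos hgi]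
      have hlo : pvFindLo slots i ≤ i := pv_findLo_le slots i
      rw [pvCollectA, if_pos h, ih hgi, heq]
      have h2 : i + 1 + 1 - pvFindLo slots i = (i + 1 - pvFindLo slots i) + 1 := by omega
      rw [h2, List.range'_concat, List.map_append, List.reverse_append]
      have h3 : pvFindLo slots i + 1 * (i + 1 - pvFindLo slots i) = i + 1 := by omega
      rw [h3]
      rfl
    · rw [not_not] at hgi
      have heq : pvFindLo slots (i+1) = i + 1 := by
        rw [show pvFindLo slots (i+1)
            = if slots.getD i "" ≠ "_" then pvFindLo slots i else i+1 from rfl,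
          if_neg (not_not_intro hgi)]
      rw [pvCollectA, if_pos h, pv_collect_empty slots hgi, heq]
      simp

lemma pv_block_eq {lo i : Nat} (h : lo ≤ i) :
    (PySem.List.pyRange (lo : Int) ((i : Int) + 1)).map
        (fun j => String.singleton (Char.ofNat (65 + j).toNat))
      = (List.range' lo (i + 1 - lo)).map (fun j => String.singleton (Char.ofNat (65 + j))) := by
  rw [PySem.List.pyRange_one, List.range'_eq_map_range, List.map_map, List.map_map]
  have hn : ((i : Int) + 1 - (lo : Int)).toNat = i + 1 - lo := by omega
  rw [hn]
  apply List.map_congr_left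
  intro k _
  simp only [Function.comp]
  have : (65 + ((lo : Int) + (k : Nat))).toNat = 65 + (lo + k) := by omega
  rw [this]

lemma pv_block_pairwise {lo i : Nat} (hle : lo ≤ i) (hv : 65 + i < 55296) :
    ((List.range' lo (i + 1 - lo)).map (fun j => String.singleton (Char.ofNat (65 + j)))).Pairwise
      (fun a b => a < b) := by
  rw [List.pairwise_map]
  refine (List.pairwise_lt_range' 1).imp_of_mem ?_
  intro a b ha hb hab
  have hbi : b ≤ i := by
    have := (List.mem_range'_1.1 hb).2
    omega
  exact pv_singleton_lt (pv_ofNat_lt (by omega) (by omega))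

lemma pv_sorted_block {lo i : Nat} (hle : lo ≤ i) (hv : 65 + i < 55296) :
    PySem.List.sorted
        (((List.range' lo (i + 1 - lo)).map (fun j => String.singleton (Char.ofNat (65 + j)))).reverse)
        (fun x => x)
      = (List.range' lo (i + 1 - lo)).map (fun j => String.singleton (Char.ofNat (65 + j))) := by
  exact PySem.List.sorted_eq_of_perm_of_pairwise_lt _ _ _
    (List.reverse_perm _).symm (pv_block_pairwise hle hv)

lemma pv_sorted_block_self {lo i : Nat} (hle : lo ≤ i) (hv : 65 + i < 55296) :
    PySem.List.sorted
        ((List.range' lo (i + 1 - lo)).map (fun j => String.singleton (Char.ofNat (65 + j))))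
        (fun x => x)
      = (List.range' lo (i + 1 - lo)).map (fun j => String.singleton (Char.ofNat (65 + j))) := by
  exact PySem.List.sorted_eq_of_perm_of_pairwise_lt _ _ _
    (List.Perm.refl _) (pv_block_pairwise hle hv)

lemma pv_main (fa : String) : ∀ e : Nat, ∀ cars : List String,
    PySem.List.count cars "_" = e → pvOK fa cars →
    ∃ bs cf,
      (∀ acc, (PySem.List.pyRange ((65 + (cars.length - e) : Nat) : Int)
          ((65 + cars.length : Nat) : Int)).foldl
          (pvStepB (pvFirstMap fa)) (some (cars, acc)) = some (cf, acc ++ bs)) ∧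
      pvGoA fa (e + 1) cars = (if e = 0 then none else some bs) ∧
      (∀ b ∈ bs, PySem.List.sorted b (fun x => x) = b) := by
  intro e
  induction e with
  | zero =>
    intro cars hc _hok
    refine ⟨[], cars, ?_, ?_, by simp⟩
    · intro acc
      rw [Nat.sub_zero, PySem.List.pyRange_one_eq_nil (le_refl _)]
      simp
    · have hc' : List.count "_" cars = 0 := by rw [← PySem.List.count_eq]; exact hc
      rw [pvGoA]
      simp [hc']
  | succ d ih =>
    intro cars hc hok
    set n := cars.length with hn
    have hen : d + 1 ≤ n := by
      have h := List.count_le_length (a := ("_" : String)) (l := cars)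
      rw [← PySem.List.count_eq, hc] at h
      exact h
    obtain ⟨hstep, hnd⟩ := hok
    rw [hc, ← hn] at hstep hnd
    obtain ⟨h95₀, i₀, htgt₀, hi₀n, hg₀, hi₀v⟩ := hstep 0 (Nat.succ_pos d)
    set c₀ := Char.ofNat (65 + (n - (d+1))) with hc₀
    have htgt₀' : PySem.List.index? fa.toList (PySem.Chars.lowerChar c₀) = some i₀ := htgt₀
    set v := String.singleton c₀ with hv
    have hvne : v ≠ "_" := pv_singleton_ne_underscore (by simpa using h95₀)
    set cars' := cars.set i₀ v with hcars'
    have hlen' : cars'.length = n := by rw [hcars', List.length_set, hn]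
    have hcount' : PySem.List.count cars' "_" = d := by
      rw [hcars']
      have h := pv_count_set (l := cars) hi₀n hg₀ hvne
      rw [hc] at h
      omega
    have hfindA : pvFindParkedCar fa c₀ = some i₀ := by
      unfold pvFindParkedCar
      have htl : (PySem.Str.lower (String.singleton c₀)).toList = [PySem.Chars.lowerChar c₀] := by
        rw [PySem.Str.toList_lower]
        simp [PySem.Chars.lower]
      rw [PySem.Str.find_eq, htl, pv_find_singleton, htgt₀']
      have hne : ((i₀ : Nat) : Int) ≠ -1 := by omega
      simp [hne]
    have hsetA : PySem.List.pySet? cars ((i₀ : Nat) : Int) v = some cars' :=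
      PySem.List.pySet?_natCast cars i₀ v hi₀n
    set lo := pvFindLo cars' i₀ with hlo
    have hlole : lo ≤ i₀ := pv_findLo_le cars' i₀
    set block := (List.range' lo (i₀ + 1 - lo)).map
      (fun j => String.singleton (Char.ofNat (65 + j))) with hblock
    have hgd' : cars'.getD i₀ "" ≠ "_" := by
      rw [hcars', pv_getD_set_self cars hi₀n]
      exact hvne
    have hgoA : pvGoA fa (d + 1 + 1) cars
        = some (block ::
            (match pvGoA fa (d + 1) cars' with
             | none => []
             | some l => l.map (fun p => PySem.List.sorted p (fun x => x)))) := by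
      rw [pvGoA]
      rw [hc, ← hn]
      rw [if_neg (Nat.succ_ne_zero d), ← hc₀, hfindA]
      dsimp only
      rw [← hv, hsetA]
      dsimp only
      rw [pv_collect_eq cars' i₀ hgd', ← hlo, pv_sorted_block hlole hi₀v, ← hblock]
    have hok' : pvOK fa cars' := by
      constructor
      · intro j hj
        rw [hcount'] at hj
        rw [hcount', hlen']
        obtain ⟨h95, i, htgt, hin, hgd, hiv⟩ := hstep (j+1) (by omega)
        have harg : 65 + (n - d) + j = 65 + (n - (d+1)) + (j+1) := by omega
        have htgt' : pvTarget fa n d j = some i := by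
          unfold pvTarget
          unfold pvTarget at htgt
          rw [harg]
          exact htgt
        refine ⟨by rw [harg]; exact h95, ⟨i, htgt', hin, ?_, hiv⟩⟩
        have hne0 : i ≠ i₀ := by
          intro hii
          have hlen : ((List.range (d+1)).map (pvTarget fa n (d+1))).length = d + 1 := by simp
          have h0lt : 0 < ((List.range (d+1)).map (pvTarget fa n (d+1))).length := by omega
          have hjlt : j + 1 < ((List.range (d+1)).map (pvTarget fa n (d+1))).length := by omega
          have hgety : ((List.range (d+1)).map (pvTarget fa n (d+1)))[0]'h0lt
              = ((List.range (d+1)).map (pvTarget fa n (d+1)))[j+1]'hjlt := by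
            simp only [List.getElem_map, List.getElem_range]
            rw [htgt₀, htgt, hii]
          have := (hnd.getElem_inj_iff).1 hgety
          omega
        rw [hcars', pv_getD_set_ne cars (fun hh => hne0 hh.symm) v]
        exact hgd
      · rw [hcount', hlen']
        have hmap : (List.range d).map (pvTarget fa n d)
            = (List.range d).map (fun j => pvTarget fa n (d+1) (j+1)) := by
          apply List.map_congr_left
          intro j _
          unfold pvTarget
          have harg : 65 + (n - d) + j = 65 + (n - (d+1)) + (j+1) := by omega
          rw [harg]
        have hsplit : (List.range (d+1)).map (pvTarget fa n (d+1))
            = pvTarget fa n (d+1) 0 :: (List.range d).map (fun j => pvTarget fa n (d+1) (j+1)) := by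
          rw [List.range_succ_eq_map, List.map_cons, List.map_map]
          rfl
        rw [hmap]
        rw [hsplit] at hnd
        exact hnd.of_cons
    obtain ⟨bs', cf, hB', hA', hsort'⟩ := ih cars' hcount' hok'
    rw [hlen'] at hB'
    have hstepB : ∀ acc, pvStepB (pvFirstMap fa) (some (cars, acc)) ((65 + (n - (d+1)) : Nat) : Int)
        = some (cars', acc ++ [block]) := by
      intro acc
      unfold pvStepB
      dsimp only
      rw [Int.toNat_natCast, ← hc₀, pv_firstMap_get?, htgt₀', Option.map_some]
      dsimp only
      rw [← hv, hsetA]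
      dsimp only
      rw [Int.toNat_natCast]
      rw [pv_block_eq hlole, ← hblock]
    have hrange : PySem.List.pyRange ((65 + (n - (d+1)) : Nat) : Int) ((65 + n : Nat) : Int)
        = ((65 + (n - (d+1)) : Nat) : Int)
          :: PySem.List.pyRange ((65 + (n - d) : Nat) : Int) ((65 + n : Nat) : Int) := by
      have harg : ((65 + (n - (d+1)) : Nat) : Int) + 1 = ((65 + (n - d) : Nat) : Int) := by
        omega
      rw [PySem.List.pyRange_one_cons (by omega), harg]
    refine ⟨block :: bs', cf, ?_, ?_, ?_⟩
    · intro acc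
      rw [hrange, List.foldl_cons, hstepB acc, hB' (acc ++ [block])]
      rw [List.append_assoc]
      rfl
    · rw [if_neg (Nat.succ_ne_zero d), hgoA]
      cases d with
      | zero =>
        have hbs' : bs' = [] := by
          have h0 := hB' []
          rw [Nat.sub_zero, PySem.List.pyRange_one_eq_nil (le_refl _)] at h0
          simp only [List.foldl_nil] at h0
          have := (Option.some.inj h0)
          have hsnd := congrArg Prod.snd this
          simpa using hsnd.symm
        have hA0 : pvGoA fa 1 cars' = none := by simpa using hA'
        rw [hA0, hbs']
      | succ s =>
        have hAs : pvGoA fa (s + 1 + 1) cars' = some bs' := by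
          simpa using hA'
        rw [hAs]
        dsimp only
        have hms : bs'.map (fun p => PySem.List.sorted p (fun x => x)) = bs' := by
          rw [List.map_congr_left (g := id) (fun b hb => hsort' b hb), List.map_id]
        rw [hms]
    · intro b hb
      rcases List.mem_cons.1 hb with hb1 | hb2
      · rw [hb1, hblock]
        exact pv_sorted_block_self hlole hi₀v
      · exact hsort' b hb2

-- ===== VERDICT (by name: the statement is the Claim_ definition above) =====
theorem GetListHidden_spec : Claim_equal_GetListHidden := by
  intro fa cars _hdom hpre
  unfold Spec_GetListHidden
  by_cases he : PySem.List.count cars "_" = 0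
  · have he' : List.count "_" cars = 0 := by
      rw [← PySem.List.count_eq]; exact he
    unfold GetListHidden GetListHidden_alt pvGoA
    simp [he']
  · obtain ⟨bs, cf, hB, hA, _⟩ := pv_main fa _ cars rfl (pv_pre_ok hpre he)
    unfold GetListHidden GetListHidden_alt
    rw [hA]
    simp only [he, if_false]
    rw [hB []]
    simp
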